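-- pv_equiv track=rewrite | github.com/981377660LMT/algorithm-study | tmp/20221007团队赛/LCP 68. 美观的花束.py | beautifulBouquet
-- ===== SOURCE A (Python) =====
-- from typing import List
-- from collections import defaultdict
--
-- MOD = int(1e9 + 7)
--
-- def beautifulBouquet(flowers: List[int], cnt: int) -> int:
--     res, left, n = 0, 0, len(flowers)
--     counter = defaultdict(int)
--     for right in range(n):
--         counter[flowers[right]] += 1
--         while left <= right and counter[flowers[right]] > cnt:
--             counter[flowers[left]] -= 1
--             left += 1
--         res += right - left + 1
--         res %= MOD
--     return res
-- ===== SOURCE B (Python) =====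
-- MOD = int(1e9 + 7)
--
-- def beautifulBouquet(flowers, cnt):
--     # occurrence-index jump instead of an inner count-shrinking while-loop
--     if cnt <= 0:
--         return 0
--     res, left = 0, 0
--     positions = {}
--     for right in range(len(flowers)):
--         x = flowers[right]
--         ps = positions.setdefault(x, [])
--         ps.append(right)
--         if len(ps) > cnt:
--             left = max(left, ps[-(cnt + 1)] + 1)
--         res = (res + right - left + 1) % MOD
--     return res
-- ===== Notes on version B (the rewrite author's own statement) =====
-- stated objective: alternative
-- what changed: Replaces the running count map plus inner while-loop shrink by a map from value to its occurrence-index list, jumping left directly to one past the (cnt+1)-th-last occurrence; cnt<=0 is answered 0 up front.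
import Mathlib
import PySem

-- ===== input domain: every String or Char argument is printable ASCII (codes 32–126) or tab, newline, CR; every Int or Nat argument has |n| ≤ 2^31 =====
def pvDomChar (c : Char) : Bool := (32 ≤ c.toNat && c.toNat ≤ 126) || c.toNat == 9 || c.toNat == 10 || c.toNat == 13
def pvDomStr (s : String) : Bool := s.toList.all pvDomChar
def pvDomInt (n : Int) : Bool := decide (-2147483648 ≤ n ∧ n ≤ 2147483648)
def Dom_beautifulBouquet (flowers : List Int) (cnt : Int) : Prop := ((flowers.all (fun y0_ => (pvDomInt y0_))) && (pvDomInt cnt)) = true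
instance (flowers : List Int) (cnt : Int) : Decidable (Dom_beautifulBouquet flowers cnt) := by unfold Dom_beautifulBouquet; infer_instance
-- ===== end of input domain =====

-- B replaces A's inner while-loop count shrink by an occurrence-index list per value with a direct left jump (alternative algorithm, similar cost).


def pvMOD : Int := 1000000007

-- ===== PORT A =====
-- inner 'while left <= right and counter[flowers[right]] > cnt' loop;
-- flowers[right] / flowers[left] are always in range here, ported as List.getD _ 0
def aWhile (flowers : List Int) (cnt : Int) (right : Nat) (left : Nat)
    (counter : PySem.Dict Int Int) : Nat × PySem.Dict Int Int :=
  if h : left ≤ right ∧ counter.getD (flowers.getD right 0) 0 > cnt then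
    aWhile flowers cnt right (left + 1)
      (counter.modify (flowers.getD left 0) 0 (· - 1))
  else (left, counter)
termination_by right + 1 - left
decreasing_by omega

def beautifulBouquet (flowers : List Int) (cnt : Int) : Int :=
  let n := flowers.length
  (((List.range n).foldl
      (fun (st : Int × Nat × PySem.Dict Int Int) (right : Nat) =>
        let counter := st.2.2.modify (flowers.getD right 0) 0 (· + 1)
        let lc := aWhile flowers cnt right st.2.1 counter
        (PySem.Int.mod (st.1 + ((right : Int) - (lc.1 : Int) + 1)) pvMOD, lc.1, lc.2))
      (0, 0, PySem.Dict.empty))).1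

-- ===== PORT B =====
-- positions[x] holds the (Nat) indices of x seen so far; ps[-(cnt+1)] is in range whenever
-- len(ps) > cnt ≥ 1, ported via pyGet? with getD 0
def beautifulBouquet_alt (flowers : List Int) (cnt : Int) : Int :=
  if cnt ≤ 0 then 0
  else
    (((List.range flowers.length).foldl
        (fun (st : Int × Nat × PySem.Dict Int (List Nat)) (right : Nat) =>
          let x := flowers.getD right 0
          let ps := st.2.2.getD x [] ++ [right]
          let positions := st.2.2.insert x ps
          let left :=
            if (ps.length : Int) > cnt then
              max st.2.1 (((PySem.List.pyGet? ps (-(cnt + 1))).getD 0) + 1)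
            else st.2.1
          (PySem.Int.mod (st.1 + ((right : Int) - (left : Int) + 1)) pvMOD, left, positions))
        (0, 0, PySem.Dict.empty))).1

-- ===== PRECONDITION & SPEC =====
def Spec_beautifulBouquet (flowers : List Int) (cnt : Int) (out : Int) : Prop := out = beautifulBouquet_alt flowers cnt
instance (flowers : List Int) (cnt : Int) (out : Int) : Decidable (Spec_beautifulBouquet flowers cnt out) := by unfold Spec_beautifulBouquet; infer_instance

-- ===== CLAIM (what is proved, stated in full; the proofs are below) =====
def Claim_equal_beautifulBouquet : Prop := ∀ (flowers : List Int) (cnt : Int), Dom_beautifulBouquet flowers cnt → Spec_beautifulBouquet flowers cnt (beautifulBouquet flowers cnt)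

-- ===== LEMMAS AND PROOFS =====

-- occ fl r x = the (sorted) list of indices i < r with fl[i] = x
def occ (fl : List Int) (r : Nat) (x : Int) : List Nat :=
  (List.range r).filter (fun i => fl.getD i 0 == x)

-- cw fl l r x = how many indices i with l ≤ i < r have fl[i] = x (the window count)
def cw (fl : List Int) (l r : Nat) (x : Int) : Nat :=
  ((occ fl r x).filter (fun i => decide (l ≤ i))).length

lemma mem_occ (fl : List Int) (r : Nat) (x : Int) (i : Nat) :
    i ∈ occ fl r x ↔ i < r ∧ fl.getD i 0 = x := by
  simp [occ, List.mem_filter, List.mem_range]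

lemma occ_succ (fl : List Int) (r : Nat) (x : Int) :
    occ fl (r + 1) x = occ fl r x ++ (if fl.getD r 0 = x then [r] else []) := by
  unfold occ
  rw [List.range_succ, List.filter_append]
  by_cases h : fl.getD r 0 = x
  · rw [if_pos h, List.filter_cons, if_pos (by simpa using h)]
    rfl
  · rw [if_neg h, List.filter_cons, if_neg (by simpa using h)]
    rfl

lemma occ_pairwise (fl : List Int) (r : Nat) (x : Int) : (occ fl r x).Pairwise (· < ·) :=
  List.Pairwise.filter _ List.pairwise_lt_range

lemma occ_nodup (fl : List Int) (r : Nat) (x : Int) : (occ fl r x).Nodup :=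
  (occ_pairwise fl r x).imp Nat.ne_of_lt

lemma cw_zero (fl : List Int) (l r : Nat) (x : Int) (h : r ≤ l) : cw fl l r x = 0 := by
  rw [cw, List.length_eq_zero_iff, List.filter_eq_nil_iff]
  intro i hi
  rw [mem_occ] at hi
  simp
  omega

lemma cw_le_occ_length (fl : List Int) (l r : Nat) (x : Int) :
    cw fl l r x ≤ (occ fl r x).length :=
  List.length_filter_le _ _

lemma cw_succ (fl : List Int) (l r : Nat) (x : Int) (h : l ≤ r) :
    cw fl l (r + 1) x = cw fl l r x + (if fl.getD r 0 = x then 1 else 0) := by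
  rw [cw, occ_succ, List.filter_append, List.length_append, cw]
  congr 1
  by_cases hx : fl.getD r 0 = x
  · rw [if_pos hx, if_pos hx, List.filter_cons, if_pos (by simpa using h)]
    rfl
  · rw [if_neg hx, if_neg hx]
    rfl

lemma cw_anti (fl : List Int) (r : Nat) (x : Int) {l l' : Nat} (h : l ≤ l') :
    cw fl l' r x ≤ cw fl l r x := by
  rw [cw, cw]
  simp only [← List.countP_eq_length_filter]
  apply List.countP_mono_left
  intro a _ ha
  simp at ha ⊢
  omega

lemma filt_succ (ls : List Nat) (h : ls.Nodup) (l : Nat) :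
    (ls.filter (fun i => decide (l ≤ i))).length
      = (ls.filter (fun i => decide (l + 1 ≤ i))).length + (if l ∈ ls then 1 else 0) := by
  induction ls with
  | nil => simp
  | cons a t ih =>
    simp only [List.nodup_cons] at h
    rw [List.filter_cons, List.filter_cons]
    by_cases hal : a = l
    · subst hal
      have ht : List.filter (fun i => decide (a ≤ i)) t
          = List.filter (fun i => decide (a + 1 ≤ i)) t := by
        apply List.filter_congr
        intro i hi
        have : i ≠ a := fun e => h.1 (e ▸ hi)
        simp
        omega
      simp [ht]
    · by_cases hla : l ≤ a
      · have h1 : l + 1 ≤ a := by omega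
        simp [hla, h1, ih h.2, Ne.symm hal]
        omega
      · have h1 : ¬ (l + 1 ≤ a) := by omega
        simp [hla, h1, ih h.2, Ne.symm hal]

lemma cw_left_succ (fl : List Int) (l r : Nat) (x : Int) :
    cw fl l r x = cw fl (l + 1) r x + (if l < r ∧ fl.getD l 0 = x then 1 else 0) := by
  rw [cw, cw, filt_succ (occ fl r x) (occ_nodup fl r x) l]
  congr 1
  by_cases hm : l < r ∧ fl.getD l 0 = x
  · rw [if_pos hm, if_pos ((mem_occ fl r x l).mpr hm)]
  · rw [if_neg hm, if_neg (fun hc => hm ((mem_occ fl r x l).mp hc))]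

lemma sorted_filter_split (a : Nat) :
    ∀ (p q : List Nat), (p ++ a :: q).Pairwise (· < ·) →
      (p ++ a :: q).filter (fun i => decide (a ≤ i)) = a :: q ∧
      (p ++ a :: q).filter (fun i => decide (a + 1 ≤ i)) = q := by
  intro p
  induction p with
  | nil =>
    intro q hq
    rw [List.nil_append] at hq ⊢
    rw [List.pairwise_cons] at hq
    have hkeep : List.filter (fun i => decide (a ≤ i)) q = q := by
      rw [List.filter_eq_self]
      intro i hi
      simpa using Nat.le_of_lt (hq.1 i hi)
    have hkeep1 : List.filter (fun i => decide (a + 1 ≤ i)) q = q := by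
      rw [List.filter_eq_self]
      intro i hi
      simpa using hq.1 i hi
    rw [List.filter_cons, List.filter_cons, if_pos (by simp), if_neg (by simp), hkeep, hkeep1]
    exact ⟨rfl, rfl⟩
  | cons b p ih =>
    intro q hq
    rw [List.cons_append, List.pairwise_cons] at hq
    have hba : b < a := hq.1 a (by simp)
    obtain ⟨ih1, ih2⟩ := ih q hq.2
    rw [List.cons_append, List.filter_cons, List.filter_cons,
      if_neg (by simp; omega), if_neg (by simp; omega), ih1, ih2]
    exact ⟨rfl, rfl⟩

-- goodL fl cnt r l L: L is where the left pointer ends up after admitting index r,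
-- starting from l — the unique point ≥ l where the window count of fl[r] first fits
def goodL (fl : List Int) (cnt : Int) (r l L : Nat) : Prop :=
  l ≤ L ∧ L ≤ r + 1 ∧ ((cw fl L (r + 1) (fl.getD r 0) : Int) ≤ cnt) ∧
    (L = l ∨ cnt < (cw fl (L - 1) (r + 1) (fl.getD r 0) : Int))

lemma goodL_unique {fl : List Int} {cnt : Int} {r l L1 L2 : Nat}
    (h1 : goodL fl cnt r l L1) (h2 : goodL fl cnt r l L2) : L1 = L2 := by
  have key : ∀ La Lb, goodL fl cnt r l La → goodL fl cnt r l Lb → ¬ (La < Lb) := by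
    intro La Lb ha hb hab
    obtain ⟨ha1, -, ha3, -⟩ := ha
    obtain ⟨hb1, -, -, hb4⟩ := hb
    rcases hb4 with he | hgt
    · omega
    · have hmono : cw fl (Lb - 1) (r + 1) (fl.getD r 0) ≤ cw fl La (r + 1) (fl.getD r 0) :=
        cw_anti fl (r + 1) (fl.getD r 0) (by omega)
      have hcast : (cw fl (Lb - 1) (r + 1) (fl.getD r 0) : Int)
          ≤ (cw fl La (r + 1) (fl.getD r 0) : Int) := by exact_mod_cast hmono
      omega
  have ha := key L1 L2 h1 h2
  have hb := key L2 L1 h2 h1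
  omega

lemma aWhile_spec (fl : List Int) (cnt : Int) (hcnt : 0 < cnt) (r : Nat) :
    ∀ (m l : Nat), r + 1 - l ≤ m → l ≤ r + 1 →
    ∀ counter : PySem.Dict Int Int,
      (∀ y, counter.getD y 0 = (cw fl l (r + 1) y : Int)) →
      goodL fl cnt r l (aWhile fl cnt r l counter).1 ∧
      (∀ y, (aWhile fl cnt r l counter).2.getD y 0
        = (cw fl (aWhile fl cnt r l counter).1 (r + 1) y : Int)) := by
  intro m
  induction m with
  | zero =>
    intro l hm hl counter hc
    have hleq : l = r + 1 := by omega
    rw [aWhile, dif_neg (by omega)]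
    refine ⟨⟨le_refl _, hl, ?_, Or.inl rfl⟩, hc⟩
    rw [cw_zero fl l (r + 1) _ (by omega)]
    simp
    omega
  | succ m ih =>
    intro l hm hl counter hc
    rw [aWhile]
    by_cases hcond : l ≤ r ∧ counter.getD (fl.getD r 0) 0 > cnt
    · rw [dif_pos hcond]
      have hlr := hcond.1
      have hgt : cnt < (cw fl l (r + 1) (fl.getD r 0) : Int) := by
        rw [← hc]; exact hcond.2
      have hc' : ∀ y, (counter.modify (fl.getD l 0) 0 (· - 1)).getD y 0
          = (cw fl (l + 1) (r + 1) y : Int) := by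
        intro y
        rw [PySem.Dict.getD_modify]
        have hstep := cw_left_succ fl l (r + 1) y
        by_cases hy : y = fl.getD l 0
        · rw [if_pos hy, hc (fl.getD l 0)]
          have hmem : l < r + 1 ∧ fl.getD l 0 = fl.getD l 0 := ⟨by omega, rfl⟩
          subst hy
          rw [if_pos hmem] at hstep
          rw [hstep]
          push_cast
          ring
        · rw [if_neg hy, hc y]
          have hnm : ¬ (l < r + 1 ∧ fl.getD l 0 = y) := fun hcc => hy (hcc.2.symm)
          rw [if_neg hnm] at hstep
          rw [hstep]
          simp
      obtain ⟨hg, hcc⟩ := ih (l + 1) (by omega) (by omega) _ hc'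
      refine ⟨?_, hcc⟩
      obtain ⟨g1, g2, g3, g4⟩ := hg
      refine ⟨by omega, g2, g3, ?_⟩
      rcases g4 with he | hgt2
      · right
        rw [he]
        simpa using hgt
      · right; exact hgt2
    · rw [dif_neg hcond]
      refine ⟨⟨le_refl _, hl, ?_, Or.inl rfl⟩, hc⟩
      by_cases hlr : l ≤ r
      · have hle' : ¬ counter.getD (fl.getD r 0) 0 > cnt := fun hgt => hcond ⟨hlr, hgt⟩
        rw [hc (fl.getD r 0)] at hle'
        show (cw fl l (r + 1) (fl.getD r 0) : Int) ≤ cnt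
        omega
      · rw [cw_zero fl l (r + 1) _ (by omega)]
        simp
        omega

lemma bjump_good (fl : List Int) (cnt : Int) (hcnt : 0 < cnt) (r l : Nat) (hl : l ≤ r) :
    goodL fl cnt r l
      (if (((occ fl (r + 1) (fl.getD r 0)).length : Int) > cnt) then
        max l (((PySem.List.pyGet? (occ fl (r + 1) (fl.getD r 0)) (-(cnt + 1))).getD 0) + 1)
      else l) := by
  set x := fl.getD r 0 with hx
  set ps := occ fl (r + 1) x with hps
  have hcw_le : cw fl l (r + 1) x ≤ ps.length := cw_le_occ_length fl l (r + 1) x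
  by_cases hbig : ((ps.length : Int) > cnt)
  · rw [if_pos hbig]
    set t := ps.length with ht
    have hkt : cnt.toNat + 1 ≤ t := by omega
    set k := t - (cnt.toNat + 1) with hk
    have hklt : k < t := by omega
    have hget : PySem.List.pyGet? ps (-(cnt + 1)) = some ps[k] := by
      rw [PySem.List.pyGet?, PySem.List.pyIdx?, ← ht]
      rw [if_neg (by omega), if_pos (by omega)]
      have hidx : t - (-(-(cnt + 1))).toNat = k := by omega
      rw [hidx]
      simp [List.getElem?_eq_getElem hklt]
    have hklt' : k < ps.length := by omega
    obtain ⟨p, hp⟩ : ∃ p, ps[k] = p := ⟨ps[k], rfl⟩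
    rw [hget, hp, Option.getD_some]
    have hpm : p < r + 1 := by
      have hmem : p ∈ ps := hp ▸ List.getElem_mem hklt'
      rw [hps, mem_occ] at hmem
      omega
    obtain ⟨pre, suf, hsplit, hlsuf⟩ :
        ∃ pre suf, ps = pre ++ p :: suf ∧ suf.length = t - (k + 1) :=
      ⟨ps.take k, ps.drop (k + 1), by
        rw [← hp]
        conv_lhs => rw [← List.take_append_drop k ps, List.drop_eq_getElem_cons hklt'], by
        rw [List.length_drop]⟩
    have hpw : (pre ++ p :: suf).Pairwise (· < ·) := by
      rw [← hsplit, hps]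
      exact occ_pairwise fl (r + 1) x
    obtain ⟨hf1, hf2⟩ := sorted_filter_split p pre suf hpw
    have hcw1 : cw fl (p + 1) (r + 1) x = t - (k + 1) := by
      rw [cw, ← hps, hsplit, hf2, hlsuf]
    have hcwp : cw fl p (r + 1) x = t - k := by
      rw [cw, ← hps, hsplit, hf1, List.length_cons, hlsuf]
      omega
    refine ⟨Nat.le_max_left _ _, by omega, ?_, ?_⟩
    · rw [← hx]
      have hmono : cw fl (max l (p + 1)) (r + 1) x ≤ cw fl (p + 1) (r + 1) x :=
        cw_anti fl (r + 1) x (Nat.le_max_right _ _)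
      rw [hcw1] at hmono
      have hcast : (cw fl (max l (p + 1)) (r + 1) x : Int) ≤ ((t - (k + 1) : Nat) : Int) := by
        exact_mod_cast hmono
      have hv : ((t - (k + 1) : Nat) : Int) = cnt := by
        push_cast [hk]
        omega
      omega
    · rw [← hx]
      by_cases hcase : p + 1 ≤ l
      · left; omega
      · right
        have hmax : max l (p + 1) = p + 1 := by omega
        rw [hmax]
        simp only [Nat.add_sub_cancel]
        rw [hcwp]
        have hv : ((t - k : Nat) : Int) = cnt + 1 := by
          push_cast [hk]
          omega
        omega
  · rw [if_neg hbig]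
    refine ⟨le_refl _, by omega, ?_, Or.inl rfl⟩
    rw [← hx]
    have hcast : (cw fl l (r + 1) x : Int) ≤ (ps.length : Int) := by exact_mod_cast hcw_le
    omega

-- the two loop bodies, named for the proofs (definitionally the port lambdas)
def stepA (fl : List Int) (cnt : Int) (st : Int × Nat × PySem.Dict Int Int) (right : Nat) :
    Int × Nat × PySem.Dict Int Int :=
  let counter := st.2.2.modify (fl.getD right 0) 0 (· + 1)
  let lc := aWhile fl cnt right st.2.1 counter
  (PySem.Int.mod (st.1 + ((right : Int) - (lc.1 : Int) + 1)) pvMOD, lc.1, lc.2)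

def stepB (fl : List Int) (cnt : Int) (st : Int × Nat × PySem.Dict Int (List Nat)) (right : Nat) :
    Int × Nat × PySem.Dict Int (List Nat) :=
  let x := fl.getD right 0
  let ps := st.2.2.getD x [] ++ [right]
  let positions := st.2.2.insert x ps
  let left :=
    if (ps.length : Int) > cnt then
      max st.2.1 (((PySem.List.pyGet? ps (-(cnt + 1))).getD 0) + 1)
    else st.2.1
  (PySem.Int.mod (st.1 + ((right : Int) - (left : Int) + 1)) pvMOD, left, positions)

lemma bb_eq (fl : List Int) (cnt : Int) :
    beautifulBouquet fl cnt
      = ((List.range fl.length).foldl (stepA fl cnt) (0, 0, PySem.Dict.empty)).1 := rfl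

lemma bbAlt_eq (fl : List Int) (cnt : Int) (h : ¬ cnt ≤ 0) :
    beautifulBouquet_alt fl cnt
      = ((List.range fl.length).foldl (stepB fl cnt) (0, 0, PySem.Dict.empty)).1 := by
  rw [beautifulBouquet_alt, if_neg h]
  rfl

lemma loop_inv (fl : List Int) (cnt : Int) (hcnt : 0 < cnt) (r : Nat) :
    ∃ res L counter positions,
      (List.range r).foldl (stepA fl cnt) (0, 0, PySem.Dict.empty) = (res, L, counter) ∧
      (List.range r).foldl (stepB fl cnt) (0, 0, PySem.Dict.empty) = (res, L, positions) ∧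
      L ≤ r ∧ (∀ y, counter.getD y 0 = (cw fl L r y : Int)) ∧
      (∀ y, positions.getD y [] = occ fl r y) ∧
      (∀ y, (cw fl L r y : Int) ≤ cnt) := by
  induction r with
  | zero =>
    refine ⟨0, 0, PySem.Dict.empty, PySem.Dict.empty, rfl, rfl, le_refl _, ?_, ?_, ?_⟩
    · intro y; rw [cw_zero fl 0 0 y (le_refl _)]; simp [PySem.Dict.getD_empty]
    · intro y; simp [PySem.Dict.getD_empty, occ]
    · intro y; rw [cw_zero fl 0 0 y (le_refl _)]; simp; omega
  | succ r ih =>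
    obtain ⟨res, L, counter, positions, hA, hB, hLr, hcinv, hpos, hle⟩ := ih
    rw [List.range_succ, List.foldl_append, List.foldl_append, List.foldl_cons,
      List.foldl_cons, List.foldl_nil, List.foldl_nil, hA, hB]
    set x := fl.getD r 0 with hx
    have hc1 : ∀ y, (counter.modify x 0 (· + 1)).getD y 0 = (cw fl L (r + 1) y : Int) := by
      intro y
      rw [PySem.Dict.getD_modify, cw_succ fl L r y hLr]
      by_cases hy : y = x
      · rw [if_pos hy, hy, hcinv x, if_pos hx.symm]
        push_cast
        ring
      · rw [if_neg hy, hcinv y, if_neg (fun e => hy (e.symm.trans hx.symm))]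
        simp
    obtain ⟨hgA, hcA⟩ := aWhile_spec fl cnt hcnt r (r + 1 - L) L (le_refl _) (by omega) _ hc1
    have hpsx : positions.getD x [] ++ [r] = occ fl (r + 1) x := by
      rw [hpos x, occ_succ, if_pos rfl]
    have hgB := bjump_good fl cnt hcnt r L hLr
    rw [← hx] at hgB
    set LA := (aWhile fl cnt r L (counter.modify x 0 (· + 1))).1 with hLA
    set LB := (if (((occ fl (r + 1) x).length : Int) > cnt) then
        max L (((PySem.List.pyGet? (occ fl (r + 1) x) (-(cnt + 1))).getD 0) + 1)
      else L) with hLB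
    have hLeq : LA = LB := goodL_unique hgA hgB
    refine ⟨PySem.Int.mod (res + ((r : Int) - (LA : Int) + 1)) pvMOD, LA,
      (aWhile fl cnt r L (counter.modify x 0 (· + 1))).2,
      positions.insert x (occ fl (r + 1) x), ?_, ?_, ?_, hcA, ?_, ?_⟩
    · simp only [stepA]
      rfl
    · simp only [stepB]
      rw [← hx, hpsx, ← hLB, ← hLeq]
    · exact hgA.2.1
    · intro y
      rw [PySem.Dict.getD_insert]
      by_cases hy : y = x
      · rw [if_pos hy, hy]
      · rw [if_neg hy, hpos y, occ_succ, if_neg (fun e => hy (e.symm.trans hx.symm)), List.append_nil]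
    · intro y
      by_cases hy : y = x
      · rw [hy]; exact hgA.2.2.1
      · have h1 : cw fl LA (r + 1) y ≤ cw fl L (r + 1) y := cw_anti fl (r + 1) y hgA.1
        have h2 : cw fl L (r + 1) y = cw fl L r y := by
          rw [cw_succ fl L r y hLr, if_neg (fun e => hy (e.symm.trans hx.symm))]
          omega
        have h3 := hle y
        have : (cw fl LA (r + 1) y : Int) ≤ (cw fl L (r + 1) y : Int) := by exact_mod_cast h1
        rw [h2] at this
        omega

lemma loop_zero (fl : List Int) (cnt : Int) (h : cnt ≤ 0) (r : Nat) :
    ∃ counter, (List.range r).foldl (stepA fl cnt) (0, 0, PySem.Dict.empty) = (0, r, counter) ∧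
      ∀ y, counter.getD y 0 = 0 := by
  induction r with
  | zero => exact ⟨PySem.Dict.empty, rfl, fun y => by simp [PySem.Dict.getD_empty]⟩
  | succ r ih =>
    obtain ⟨counter, hA, hc⟩ := ih
    rw [List.range_succ, List.foldl_append, List.foldl_cons, List.foldl_nil, hA]
    set x := fl.getD r 0 with hx
    have h1 : (counter.modify x 0 (· + 1)).getD x 0 = 1 := by
      rw [PySem.Dict.getD_modify, if_pos rfl, hc x]
      omega
    have hw : aWhile fl cnt r r (counter.modify x 0 (· + 1))
        = (r + 1, (counter.modify x 0 (· + 1)).modify x 0 (· - 1)) := by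
      rw [aWhile, dif_pos ⟨le_refl r, by rw [← hx, h1]; omega⟩]
      rw [aWhile, dif_neg (by omega)]
    refine ⟨(counter.modify x 0 (· + 1)).modify x 0 (· - 1), ?_, ?_⟩
    · simp only [stepA]
      rw [← hx, hw]
      have hres : (0 : Int) + ((r : Int) - ((r + 1 : Nat) : Int) + 1) = 0 := by
        push_cast; ring
      rw [hres]
      have hmod : PySem.Int.mod 0 pvMOD = 0 := by decide
      rw [hmod]
    · intro y
      rw [PySem.Dict.getD_modify]
      by_cases hy : y = x
      · rw [if_pos hy, h1]; omega
      · rw [if_neg hy, PySem.Dict.getD_modify, if_neg hy, hc y]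

-- ===== VERDICT (by name: the statement is the Claim_ definition above) =====
theorem beautifulBouquet_spec : Claim_equal_beautifulBouquet := by
  intro fl cnt _
  unfold Spec_beautifulBouquet
  by_cases hcnt : cnt ≤ 0
  · rw [beautifulBouquet_alt, if_pos hcnt, bb_eq]
    obtain ⟨counter, hA, -⟩ := loop_zero fl cnt hcnt fl.length
    rw [hA]
  · obtain ⟨res, L, counter, positions, hA, hB, -⟩ :=
      loop_inv fl cnt (by omega) fl.length
    rw [bb_eq, bbAlt_eq fl cnt hcnt, hA, hB]
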